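-- pv_equiv track=rewrite | github.com/IazaKana/algorithm_2023 | inflearn_codingtest_python/section3/3n5.py | solution
-- ===== SOURCE A (Python) =====
-- from collections import Counter
--
-- def solution(s):
--     answer = 0
--     a = 0
--     nH = Counter(s)
--     for key in nH:
--         if nH[key] % 2 == 0:
--             answer += nH[key]
--         else:
--             answer += nH[key] - 1
--
--     return answer
-- ===== SOURCE B (Python) =====
-- def solution(s):
--     t = sorted(s)
--     answer = 0
--     i = 0
--     while i + 1 < len(t):
--         if t[i] == t[i + 1]:
--             answer += 2
--             i += 2
--         else:
--             i += 1
--     return answer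
-- ===== Notes on version B (the rewrite author's own statement) =====
-- stated objective: alternative
-- what changed: B drops the Counter entirely: it sorts the characters and walks the sorted list once, pairing each adjacent equal pair and adding 2 per pair, instead of hashing frequencies and summing each bucket rounded down to even.
import Mathlib
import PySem

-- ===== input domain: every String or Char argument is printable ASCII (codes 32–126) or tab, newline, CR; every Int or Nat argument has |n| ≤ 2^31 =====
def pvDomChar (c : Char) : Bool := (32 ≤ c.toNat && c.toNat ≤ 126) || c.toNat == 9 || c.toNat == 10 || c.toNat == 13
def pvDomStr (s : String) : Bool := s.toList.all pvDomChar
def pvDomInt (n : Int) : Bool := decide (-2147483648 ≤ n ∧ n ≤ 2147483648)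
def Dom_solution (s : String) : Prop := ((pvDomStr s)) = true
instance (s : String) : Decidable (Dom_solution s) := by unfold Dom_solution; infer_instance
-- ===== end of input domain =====

-- B is a different algorithm: it sorts the characters and pairs adjacent equal ones
-- in a single scan (2 per pair), instead of counting frequencies in a hash map and
-- summing each bucket rounded down to even.

-- ===== PORT A =====
def solution (s : String) : Int :=
  let nH := PySem.Dict.counter s.toList
  nH.keys.foldl (fun answer key =>
    if PySem.Int.mod (nH.getD key 0) 2 = 0 then
      answer + nH.getD key 0
    else
      answer + (nH.getD key 0 - 1)) 0

-- ===== PORT B =====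
-- the while loop over index i of Source B: the remaining suffix t[i:] drives the recursion
def pairScan : List Char → Int
  | [] => 0
  | [_] => 0
  | a :: b :: t => if a = b then 2 + pairScan t else pairScan (b :: t)

def solution_alt (s : String) : Int :=
  pairScan (PySem.List.sorted s.toList (fun c => c) false)

-- ===== PRECONDITION & SPEC =====
def Spec_solution (s : String) (out : Int) : Prop := out = solution_alt s
instance (s : String) (out : Int) : Decidable (Spec_solution s out) := by unfold Spec_solution; infer_instance

-- ===== CLAIM (what is proved, stated in full; the proofs are below) =====
def Claim_equal_solution : Prop := ∀ (s : String), Dom_solution s → Spec_solution s (solution s)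

-- ===== LEMMAS AND PROOFS =====

-- common value: sum, over the distinct characters of l, of count rounded down to even
def pvS (l : List Char) : Int :=
  ∑ k ∈ l.toFinset, ((l.count k / 2 : Nat) : Int) * 2

theorem pvS_nil : pvS [] = 0 := by simp [pvS]

theorem pvS_single (a : Char) : pvS [a] = 0 := by simp [pvS]

theorem pvS_cons_cons (x : Char) (t : List Char) : pvS (x :: x :: t) = 2 + pvS t := by
  unfold pvS
  by_cases hx : x ∈ t
  · have hft : (x :: x :: t).toFinset = t.toFinset := by
      simp [List.toFinset_cons, Finset.insert_eq_self.mpr (List.mem_toFinset.mpr hx)]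
    rw [hft]
    have hxF : x ∈ t.toFinset := List.mem_toFinset.mpr hx
    rw [← Finset.sum_erase_add _ _ hxF, ← Finset.sum_erase_add _ _ hxF]
    have hoff : ∀ k ∈ t.toFinset.erase x,
        (((x :: x :: t).count k / 2 : Nat) : Int) * 2 = ((t.count k / 2 : Nat) : Int) * 2 := by
      intro k hk
      have hne : k ≠ x := Finset.ne_of_mem_erase hk
      simp [Ne.symm hne]
    rw [Finset.sum_congr rfl hoff]
    have hcx : (x :: x :: t).count x = t.count x + 2 := by simp
    rw [hcx]
    have : ((t.count x + 2) / 2 : Nat) = t.count x / 2 + 1 := by omega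
    rw [this]
    push_cast
    ring
  · have hft : (x :: x :: t).toFinset = insert x t.toFinset := by
      simp [List.toFinset_cons]
    rw [hft]
    have hxF : x ∉ t.toFinset := fun h => hx (List.mem_toFinset.mp h)
    rw [Finset.sum_insert hxF]
    have hcx : (x :: x :: t).count x = 2 := by
      simp [List.count_eq_zero_of_not_mem hx]
    rw [hcx]
    have hoff : ∀ k ∈ t.toFinset,
        (((x :: x :: t).count k / 2 : Nat) : Int) * 2 = ((t.count k / 2 : Nat) : Int) * 2 := by
      intro k hk
      have hne : k ≠ x := fun h => hxF (h ▸ hk)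
      simp [Ne.symm hne]
    rw [Finset.sum_congr rfl hoff]
    norm_num

theorem pvS_cons_not_mem (a : Char) (t : List Char) (ha : a ∉ t) :
    pvS (a :: t) = pvS t := by
  unfold pvS
  have hft : (a :: t).toFinset = insert a t.toFinset := by simp [List.toFinset_cons]
  have haF : a ∉ t.toFinset := fun h => ha (List.mem_toFinset.mp h)
  rw [hft, Finset.sum_insert haF]
  have hca : (a :: t).count a = 1 := by
    simp [List.count_eq_zero_of_not_mem ha]
  rw [hca]
  have hoff : ∀ k ∈ t.toFinset,
      (((a :: t).count k / 2 : Nat) : Int) * 2 = ((t.count k / 2 : Nat) : Int) * 2 := by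
    intro k hk
    have hne : k ≠ a := fun h => haF (h ▸ hk)
    simp [Ne.symm hne]
  rw [Finset.sum_congr rfl hoff]
  norm_num

theorem pvS_perm {l l' : List Char} (h : l.Perm l') : pvS l = pvS l' := by
  unfold pvS
  rw [List.toFinset_eq_of_perm _ _ h]
  exact Finset.sum_congr rfl (fun k _ => by rw [h.count_eq])

-- a sorted list's pair scan computes pvS
theorem pairScan_sorted (l : List Char) (h : l.Pairwise (· ≤ ·)) :
    pairScan l = pvS l := by
  fun_induction pairScan l with
  | case1 => rw [pvS_nil]
  | case2 a => rw [pvS_single]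
  | case3 a t ih =>
    rw [pvS_cons_cons]
    have ht : t.Pairwise (· ≤ ·) := (List.pairwise_cons.mp (List.pairwise_cons.mp h).2).2
    rw [ih ht]
  | case4 a b t hne ih =>
    have h1 := List.pairwise_cons.mp h
    have h2 := List.pairwise_cons.mp h1.2
    have hab : a ≤ b := h1.1 b (by simp)
    have hnotmem : a ∉ b :: t := by
      intro hmem
      rcases List.mem_cons.mp hmem with rfl | hmt
      · exact hne rfl
      · exact hne (le_antisymm hab (h2.1 a hmt))
    rw [pvS_cons_not_mem a (b :: t) hnotmem]
    exact ih h1.2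

-- ===== VERDICT (by name: the statement is the Claim_ definition above) =====
theorem solution_spec : Claim_equal_solution := by
  intro s _
  unfold Spec_solution solution solution_alt
  simp only [PySem.Dict.keys_counter, PySem.Dict.getD_counter]
  -- B side: pair scan of the sorted list is pvS of the original list
  rw [pairScan_sorted _ (PySem.List.sorted_pairwise s.toList (fun c => c) )]
  rw [pvS_perm (PySem.List.sorted_perm s.toList (fun c => c) false)]
  -- A side: the foldl over distinct keys is pvS
  rw [show (fun (answer : Int) key =>
      if PySem.Int.mod ((s.toList.count key : Int)) 2 = 0 then
        answer + (s.toList.count key : Int)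
      else answer + ((s.toList.count key : Int) - 1))
    = (fun answer key => answer + (if PySem.Int.mod ((s.toList.count key : Int)) 2 = 0 then (s.toList.count key : Int) else (s.toList.count key : Int) - 1)) from by
      funext a k; split <;> rfl]
  rw [PySem.List.foldl_add]
  have hval : ∀ k : Char,
      (if PySem.Int.mod ((s.toList.count k : Int)) 2 = 0 then (s.toList.count k : Int)
       else (s.toList.count k : Int) - 1)
      = ((s.toList.count k / 2 : Nat) : Int) * 2 := by
    intro k
    set n := s.toList.count k with hn
    have hm : PySem.Int.mod ((n : Int)) 2 = ((n % 2 : Nat) : Int) := by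
      exact_mod_cast PySem.Int.mod_natCast n 2
    rw [hm]
    by_cases hp : n % 2 = 0
    · rw [if_pos (by exact_mod_cast hp)]
      push_cast; omega
    · rw [if_neg (by exact_mod_cast hp)]
      push_cast; omega
  rw [List.map_congr_left (fun k _ => hval k)]
  unfold pvS
  rw [← List.sum_toFinset _ (PySem.Set.nodup_ofList s.toList), zero_add]
  apply Finset.sum_congr _ (fun k _ => rfl)
  apply Finset.ext
  intro k
  simp [List.mem_toFinset, PySem.Set.mem_ofList]
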